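-- pv_equiv track=rewrite | github.com/Kayto/Husky-Hunter | Progs/image_writer/gen_hline.py | bytes_to_runs
-- ===== SOURCE A (Python) =====
-- def bytes_to_runs(data_values, width=240, height=64):
--     """Convert flat byte array to per-row horizontal runs."""
--     bpr = width // 8
--     all_rows = []
--
--     for y in range(height):
--         row_bytes = data_values[y * bpr : (y + 1) * bpr]
--         # Unpack bytes to pixel array
--         pixels = []
--         for v in row_bytes:
--             for bit in range(7, -1, -1):
--                 pixels.append(1 if (v >> bit) & 1 else 0)
--
--         # Find horizontal runs
--         runs = []
--         x = 0
--         while x < width: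
--             if pixels[x]:
--                 xs = x
--                 while x < width and pixels[x]:
--                     x += 1
--                 runs.append((xs, x - 1))
--             else:
--                 x += 1
--         all_rows.append(runs)
--
--     return all_rows
-- ===== SOURCE B (Python) =====
-- def bytes_to_runs(data_values, width=240, height=64):
--     """Convert flat byte array to per-row horizontal runs."""
--     bpr = width // 8
--     all_rows = []
--     for y in range(height):
--         # pack the row into one width-bit integer, MSB = leftmost pixel
--         n = 0
--         for i in range(y * bpr, (y + 1) * bpr):
--             n = n * 256 + data_values[i] % 256
--         # run starts = 1-bits whose higher neighbour is 0; run ends = 1-bits whose lower neighbour is 0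
--         s = n ^ (n & (n >> 1))
--         e = n ^ (n & (n << 1))
--         runs = []
--         while s:
--             sb = s.bit_length() - 1
--             eb = e.bit_length() - 1
--             runs.append((width - 1 - sb, width - 1 - eb))
--             s ^= 1 << sb
--             e ^= 1 << eb
--         all_rows.append(runs)
--     return all_rows
-- ===== Notes on version B (the rewrite author's own statement) =====
-- stated objective: alternative
-- what changed: Instead of unpacking each row into a pixel list and scanning it with an index-walking while loop, B packs the row into one width-bit integer n and finds runs by bit arithmetic: edge masks s = n ^ (n & (n>>1)) (run starts) and e = n ^ (n & (n<<1)) (run ends), then repeatedly pops the highest set bit of each mask, one pop per run; the per-pixel scan disappears.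
import Mathlib
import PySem

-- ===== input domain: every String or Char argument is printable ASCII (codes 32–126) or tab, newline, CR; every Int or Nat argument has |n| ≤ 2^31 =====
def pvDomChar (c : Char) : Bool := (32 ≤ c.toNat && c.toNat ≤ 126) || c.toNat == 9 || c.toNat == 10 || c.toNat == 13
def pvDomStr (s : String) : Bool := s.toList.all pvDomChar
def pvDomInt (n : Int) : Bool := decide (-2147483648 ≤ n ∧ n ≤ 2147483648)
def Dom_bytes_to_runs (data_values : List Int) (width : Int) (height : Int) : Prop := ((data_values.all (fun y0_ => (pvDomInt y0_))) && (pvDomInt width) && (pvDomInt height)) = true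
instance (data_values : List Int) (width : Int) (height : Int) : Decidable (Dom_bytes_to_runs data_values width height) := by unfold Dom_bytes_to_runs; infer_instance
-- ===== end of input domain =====

-- B replaces A's pixel-list scan by bit arithmetic on one packed row integer:
-- edge masks give the run starts/ends, popped highest-bit-first (objective: alternative algorithm).

-- ===== PORT A =====

-- Python's '(v >> bit) & 1' (bit is a nonnegative Int from range(7, -1, -1))
def pvBitOf (v bit : Int) : Int := PySem.Int.band (v >>> bit.toNat) 1

-- inner 'while x < width and pixels[x]: x += 1' of A
def pvRunEnd (pixels : List Int) (width x : Int) : Int :=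
  if h : x < width ∧ PySem.List.pyGetD pixels x 0 ≠ 0 then pvRunEnd pixels width (x + 1) else x
termination_by (width - x).toNat
decreasing_by simp_wf; omega

-- the call in pvScan needs x + 1 ≤ pvRunEnd … (x + 1) for termination
theorem pvRunEnd_ge (pixels : List Int) (width x : Int) : x ≤ pvRunEnd pixels width x := by
  fun_induction pvRunEnd pixels width x <;> omega

-- outer 'while x < width: …' of A
def pvScan (pixels : List Int) (width x : Int) (runs : List (Int × Int)) : List (Int × Int) :=
  if h : x < width then
    if PySem.List.pyGetD pixels x 0 ≠ 0 then
      pvScan pixels width (pvRunEnd pixels width (x + 1))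
        (runs ++ [(x, pvRunEnd pixels width (x + 1) - 1)])
    else pvScan pixels width (x + 1) runs
  else runs
termination_by (width - x).toNat
decreasing_by
  · have := pvRunEnd_ge pixels width (x + 1); simp_wf; omega
  · simp_wf; omega

def bytes_to_runs (data_values : List Int) (width : Int) (height : Int) : List (List (Int × Int)) :=
  let bpr := PySem.Int.floordiv width 8
  (PySem.List.pyRange 0 height 1).foldl (fun all_rows y =>
    let row_bytes := PySem.List.slice data_values (some (y * bpr)) (some ((y + 1) * bpr))
    let pixels := row_bytes.foldl (fun pix v =>
      (PySem.List.pyRange 7 (-1) (-1)).foldl (fun pix bit =>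
        pix ++ [if pvBitOf v bit ≠ 0 then (1 : Int) else 0]) pix) []
    all_rows ++ [pvScan pixels width 0 []]) []

-- ===== PORT B =====

-- top bit of a Nat in its bit-length range (used for pvPop's termination)
theorem pvTopBit (m k : Nat) (h1 : 2 ^ k ≤ m) (h2 : m < 2 ^ (k + 1)) : m.testBit k = true := by
  have hpos : 0 < 2 ^ k := Nat.two_pow_pos k
  have h3 : 1 ≤ m / 2 ^ k := (Nat.one_le_div_iff hpos).2 h1
  have h4 : m / 2 ^ k < 2 := by
    rw [Nat.div_lt_iff_lt_mul hpos]
    rw [pow_succ] at h2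
    omega
  rw [Nat.testBit_eq_decide_div_mod_eq]
  have : m / 2 ^ k = 1 := by omega
  simp [this]

-- 's ^= 1 << (s.bit_length()-1)' strictly decreases a positive s (termination of pvPop)
theorem pvPopNat_dec (m : Nat) (hm : 0 < m) :
    m ^^^ 2 ^ (PySem.Int.bitLength (m : Int) - 1) < m := by
  have hm0 : (m : Int) ≠ 0 := by exact_mod_cast hm.ne'
  have hlt := PySem.Int.lt_two_pow_bitLength (m : Int)
  have hge := PySem.Int.two_pow_bitLength_le (m : Int) hm0
  rw [Int.natAbs_natCast] at hlt hge
  have hB1 : 1 ≤ PySem.Int.bitLength (m : Int) := by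
    by_contra h
    have : PySem.Int.bitLength (m : Int) = 0 := by omega
    rw [this] at hlt; simp at hlt; omega
  set t := PySem.Int.bitLength (m : Int) - 1 with ht
  have h2 : m < 2 ^ (t + 1) := by rwa [show t + 1 = PySem.Int.bitLength (m : Int) by omega]
  have htb : m.testBit t = true := pvTopBit m t hge h2
  apply Nat.lt_of_testBit t
  · simp [Nat.testBit_xor, htb, Nat.testBit_two_pow]
  · exact htb
  · intro j hj
    simp [Nat.testBit_xor, Nat.testBit_two_pow, (show ¬ t = j by omega)]

theorem pvPop_dec (s : Int) (hs : 0 < s) :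
    (PySem.Int.bxor s (1 <<< (PySem.Int.bitLength s - 1))).toNat < s.toNat := by
  obtain ⟨m, rfl⟩ : ∃ m : Nat, s = (m : Int) := ⟨s.toNat, (Int.toNat_of_nonneg hs.le).symm⟩
  rw [PySem.Int.bxor_natCast, Int.toNat_natCast, Int.toNat_natCast, Nat.shiftLeft_eq, one_mul]
  exact pvPopNat_dec m (by exact_mod_cast hs)

-- 'while s: …' of B; on every call Source B makes, s ≥ 0 (bitwise combination of a
-- nonnegative n), so Python's test 's != 0' is '0 < s' — phrased so for termination.
def pvPop (width : Int) (s e : Int) : List (Int × Int) :=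
  if hs : 0 < s then
    let sb := PySem.Int.bitLength s - 1
    let eb := PySem.Int.bitLength e - 1
    (width - 1 - (sb : Int), width - 1 - (eb : Int)) ::
      pvPop width (PySem.Int.bxor s (1 <<< sb)) (PySem.Int.bxor e (1 <<< eb))
  else []
termination_by s.toNat
decreasing_by exact pvPop_dec s hs

-- 'data_values[i]' inside the packing loop: pyGetD is exact here — under Pre_ every index
-- the loop reaches is in range (and for width < 0 the range is empty)
def bytes_to_runs_alt (data_values : List Int) (width : Int) (height : Int) : List (List (Int × Int)) :=
  let bpr := PySem.Int.floordiv width 8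
  (PySem.List.pyRange 0 height 1).foldl (fun all_rows y =>
    let n := (PySem.List.pyRange (y * bpr) ((y + 1) * bpr) 1).foldl
      (fun n i => n * 256 + PySem.Int.mod (PySem.List.pyGetD data_values i 0) 256) 0
    let s := PySem.Int.bxor n (PySem.Int.band n (n >>> (1 : Nat)))
    let e := PySem.Int.bxor n (PySem.Int.band n (n <<< (1 : Nat)))
    all_rows ++ [pvPop width s e]) []

-- ===== PRECONDITION & SPEC =====
-- Pre_ is exactly the inputs on which A returns normally: A raises IndexError iff
-- height > 0 and width ≥ 0 and (width is not a multiple of 8, or the data is shorter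
-- than the width//8 bytes per row it indexes).
def Pre_bytes_to_runs (data_values : List Int) (width : Int) (height : Int) : Prop :=
  height ≤ 0 ∨ width < 0 ∨ (0 ≤ width ∧ PySem.Int.mod width 8 = 0 ∧
    PySem.Int.floordiv width 8 * height ≤ (data_values.length : Int))
instance (data_values : List Int) (width : Int) (height : Int) : Decidable (Pre_bytes_to_runs data_values width height) := by unfold Pre_bytes_to_runs; infer_instance

def pvWitness_bytes_to_runs : List Int × Int × Int := ([255, 0], 8, 2)

def Spec_bytes_to_runs (data_values : List Int) (width : Int) (height : Int) (out : List (List (Int × Int))) : Prop := out = bytes_to_runs_alt data_values width height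
instance (data_values : List Int) (width : Int) (height : Int) (out : List (List (Int × Int))) : Decidable (Spec_bytes_to_runs data_values width height out) := by unfold Spec_bytes_to_runs; infer_instance

-- ===== CLAIM (what is proved, stated in full; the proofs are below) =====
def Claim_equal_bytes_to_runs : Prop := ∀ (data_values : List Int) (width : Int) (height : Int), Dom_bytes_to_runs data_values width height → Pre_bytes_to_runs data_values width height → Spec_bytes_to_runs data_values width height (bytes_to_runs data_values width height)

-- ===== LEMMAS AND PROOFS =====

-- ---- the reference value both sides are reduced to: run-length groups of a 0/1 pixel list ----

def pvGroupRuns (l : List Int) (i : Int) : List (Int × Int) :=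
  match l with
  | [] => []
  | p :: rest =>
    let n : Int := 1 + (rest.takeWhile (· == p)).length
    let tail := pvGroupRuns (rest.dropWhile (· == p)) (i + n)
    if p ≠ 0 then (i, i + n - 1) :: tail else tail
termination_by l.length
decreasing_by have := List.length_dropWhile_le (· == p) rest; simp_wf; omega

-- ---- A-side: the scanning loop computes pvGroupRuns (kept from the A port analysis) ----

theorem pvBand01 (v : Int) : PySem.Int.band v 1 = 0 ∨ PySem.Int.band v 1 = 1 := by
  rw [PySem.Int.band_one]
  have h1 := PySem.Int.mod_nonneg v (b := 2) (by norm_num)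
  have h2 := PySem.Int.mod_lt v (b := 2) (by norm_num)
  omega

theorem pvBitOf01 (v bit : Int) : pvBitOf v bit = 0 ∨ pvBitOf v bit = 1 :=
  pvBand01 _

theorem pvIteBand (v bit : Int) :
    (if pvBitOf v bit ≠ 0 then (1 : Int) else 0) = pvBitOf v bit := by
  rcases pvBitOf01 v bit with h | h <;> simp [h]

-- A's nested append loops build the same pixel list as a flatMap
theorem pvPixels_eq (row : List Int) :
    row.foldl (fun (pix : List Int) v =>
      (PySem.List.pyRange 7 (-1) (-1)).foldl (fun (pix : List Int) bit =>
        pix ++ [if pvBitOf v bit ≠ 0 then (1 : Int) else 0]) pix) []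
    = row.flatMap (fun v =>
        (PySem.List.pyRange 7 (-1) (-1)).map (fun bit => pvBitOf v bit)) := by
  have hinner : (fun (pix : List Int) v =>
      (PySem.List.pyRange 7 (-1) (-1)).foldl (fun (pix : List Int) bit =>
        pix ++ [if pvBitOf v bit ≠ 0 then (1 : Int) else 0]) pix)
      = fun (pix : List Int) v => pix ++ (PySem.List.pyRange 7 (-1) (-1)).map
          (fun bit => if pvBitOf v bit ≠ 0 then (1 : Int) else 0) := by
    funext pix v
    exact PySem.List.foldl_append_singleton_eq_map _ _ _
  rw [hinner, PySem.List.foldl_append_eq_flatMap]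
  simp only [List.nil_append, pvIteBand]

theorem pvPixels_mem01 (row : List Int) (p : Int)
    (hp : p ∈ row.flatMap (fun v =>
      (PySem.List.pyRange 7 (-1) (-1)).map (fun bit => pvBitOf v bit))) :
    p = 0 ∨ p = 1 := by
  simp only [List.mem_flatMap, List.mem_map] at hp
  obtain ⟨v, -, bit, -, rfl⟩ := hp
  exact pvBitOf01 _ _

theorem pvPixels_len (row : List Int) :
    (row.flatMap (fun v =>
      (PySem.List.pyRange 7 (-1) (-1)).map (fun bit => pvBitOf v bit))).length
    = 8 * row.length := by
  induction row with
  | nil => simp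
  | cons v t ih =>
    simp only [List.flatMap_cons, List.length_append, List.length_map, ih,
      PySem.List.length_pyRange_neg_one, List.length_cons]
    omega

theorem pvDropWhile_eq_drop (q : Int → Bool) (l : List Int) :
    l.dropWhile q = l.drop (l.takeWhile q).length := by
  induction l with
  | nil => simp
  | cons a t ih => by_cases h : q a <;> simp [List.dropWhile_cons, List.takeWhile_cons, h, ih]

theorem pvRunEnd_eq (pixels : List Int) (h01 : ∀ p ∈ pixels, p = 0 ∨ p = 1) :
    ∀ (n : Nat) (x : Int), 0 ≤ x → pixels.length - x.toNat = n →
    pvRunEnd pixels (pixels.length : Int) x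
      = x + ((pixels.drop x.toNat).takeWhile (· == (1 : Int))).length := by
  intro n
  induction n using Nat.strong_induction_on with
  | _ n ih =>
    intro x hx hn
    rw [pvRunEnd]
    split
    · rename_i h
      have hlt : x.toNat < pixels.length := by omega
      have hdrop := List.drop_eq_getElem_cons hlt
      have hget : PySem.List.pyGetD pixels x 0 = pixels[x.toNat] :=
        PySem.List.pyGetD_eq_getElem pixels 0 hx h.1
      have hone : pixels[x.toNat] = 1 := by
        rcases h01 _ (List.getElem_mem hlt) with h0 | h1
        · exact absurd (hget.trans h0) h.2
        · exact h1
      have hrec := ih (pixels.length - (x + 1).toNat) (by omega) (x + 1) (by omega) rfl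
      rw [hrec, hdrop, hone]
      have hxs : (x + 1).toNat = x.toNat + 1 := by omega
      rw [hxs]
      simp [List.takeWhile_cons]
      omega
    · rename_i h
      push_neg at h
      by_cases hlt : x < (pixels.length : Int)
      · have hlt' : x.toNat < pixels.length := by omega
        have hdrop := List.drop_eq_getElem_cons hlt'
        have hget : PySem.List.pyGetD pixels x 0 = pixels[x.toNat] :=
          PySem.List.pyGetD_eq_getElem pixels 0 hx hlt
        have hzero : pixels[x.toNat] = 0 := by rw [← hget]; exact h hlt
        rw [hdrop, hzero]
        simp [List.takeWhile_cons]
      · have : pixels.drop x.toNat = [] := List.drop_eq_nil_of_le (by omega)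
        simp [this]

-- skipping a zero-group at once = entering pvGroupRuns at its start
theorem pvGroupRuns_zeros (l : List Int) (i : Int) :
    pvGroupRuns (l.dropWhile (· == (0 : Int))) (i + ((l.takeWhile (· == (0 : Int))).length : Int))
      = pvGroupRuns l i := by
  cases l with
  | nil => simp
  | cons a t =>
    by_cases h : a = 0
    · subst h
      conv_rhs => rw [pvGroupRuns]
      rw [if_neg (by norm_num : ¬((0 : Int) ≠ 0))]
      simp only [List.dropWhile_cons, List.takeWhile_cons, beq_self_eq_true, if_true,
        List.length_cons]
      congr 1
      push_cast
      ring
    · have hb : ((a == (0 : Int)) = false) := by simp [h]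
      simp [List.dropWhile_cons, List.takeWhile_cons, hb]

theorem pvScan_eq (pixels : List Int) (h01 : ∀ p ∈ pixels, p = 0 ∨ p = 1) :
    ∀ (n : Nat) (x : Int) (runs : List (Int × Int)), 0 ≤ x → pixels.length - x.toNat = n →
    pvScan pixels (pixels.length : Int) x runs
      = runs ++ pvGroupRuns (pixels.drop x.toNat) x := by
  intro n
  induction n using Nat.strong_induction_on with
  | _ n ih =>
    intro x runs hx hn
    rw [pvScan]
    split
    · rename_i hlt
      have hlt' : x.toNat < pixels.length := by omega
      have hdrop := List.drop_eq_getElem_cons hlt'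
      have hget : PySem.List.pyGetD pixels x 0 = pixels[x.toNat] :=
        PySem.List.pyGetD_eq_getElem pixels 0 hx hlt
      split
      · rename_i hnz
        have hone : pixels[x.toNat] = 1 := by
          rcases h01 _ (List.getElem_mem hlt') with h0 | h1
          · exact absurd (hget.trans h0) hnz
          · exact h1
        have hxsucc : (x + 1).toNat = x.toNat + 1 := by omega
        set k : Nat := ((pixels.drop (x.toNat + 1)).takeWhile (· == (1 : Int))).length with hk
        have hkle : k ≤ (pixels.drop (x.toNat + 1)).length := by
          rw [hk]; exact (List.takeWhile_prefix _).length_le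
        have hdlen : (pixels.drop (x.toNat + 1)).length = pixels.length - (x.toNat + 1) := by
          simp
        have he : pvRunEnd pixels (pixels.length : Int) (x + 1) = x + 1 + (k : Int) := by
          rw [pvRunEnd_eq pixels h01 (pixels.length - (x + 1).toNat) (x + 1) (by omega) rfl,
            hxsucc]
        rw [he]
        have ht : (x + 1 + (k : Int)).toNat = x.toNat + 1 + k := by omega
        have hrec := ih (pixels.length - (x.toNat + 1 + k)) (by omega) (x + 1 + (k : Int))
          (runs ++ [(x, x + 1 + (k : Int) - 1)]) (by omega) (by omega)
        rw [hrec, ht]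
        have hdw : pixels.drop (x.toNat + 1 + k)
            = (pixels.drop (x.toNat + 1)).dropWhile (· == (1 : Int)) := by
          rw [pvDropWhile_eq_drop, ← hk, List.drop_drop]
        rw [hdw, hdrop, hone]
        conv_rhs => rw [pvGroupRuns]
        rw [if_pos (by norm_num : ((1 : Int) ≠ 0))]
        simp only [List.append_assoc, List.singleton_append, ← hk]
        have harith : x + 1 + (k : Int) = x + (1 + (k : Int)) := by ring
        rw [harith]
      · rename_i hz
        have hzero : pixels[x.toNat] = 0 := by rw [← hget]; simpa using hz
        have hrec := ih (pixels.length - (x.toNat + 1)) (by omega) (x + 1) runs (by omega)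
          (by omega)
        rw [hrec]
        congr 1
        have hxsucc : (x + 1).toNat = x.toNat + 1 := by omega
        rw [hxsucc, hdrop, hzero]
        conv_rhs => rw [pvGroupRuns]
        rw [if_neg (by norm_num : ¬((0 : Int) ≠ 0))]
        rw [← pvGroupRuns_zeros (pixels.drop (x.toNat + 1)) (x + 1)]
        have harith : (x + 1) + (((pixels.drop (x.toNat + 1)).takeWhile (· == (0 : Int))).length : Int)
            = x + (1 + (((pixels.drop (x.toNat + 1)).takeWhile (· == (0 : Int))).length : Int)) := by
          ring
        rw [harith]
    · rename_i hge
      have : pixels.drop x.toNat = [] := List.drop_eq_nil_of_le (by omega)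
      simp [this, pvGroupRuns]

-- A-side row equality under Pre_
theorem pvRow_eq (data_values : List Int) (width y : Int)
    (hw : 0 ≤ width) (hmod : PySem.Int.mod width 8 = 0)
    (h0 : 0 ≤ y * PySem.Int.floordiv width 8)
    (hle : (y + 1) * PySem.Int.floordiv width 8 ≤ (data_values.length : Int)) :
    pvScan ((PySem.List.slice data_values (some (y * PySem.Int.floordiv width 8))
        (some ((y + 1) * PySem.Int.floordiv width 8))).flatMap
      (fun v => (PySem.List.pyRange 7 (-1) (-1)).map (fun bit => pvBitOf v bit)))
      width 0 []
    = pvGroupRuns ((PySem.List.slice data_values (some (y * PySem.Int.floordiv width 8))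
        (some ((y + 1) * PySem.Int.floordiv width 8))).flatMap
      (fun v => (PySem.List.pyRange 7 (-1) (-1)).map (fun bit => pvBitOf v bit))) 0 := by
  set bpr := PySem.Int.floordiv width 8 with hbpr
  have hbpr0 : 0 ≤ bpr := by
    rw [hbpr, PySem.Int.floordiv_eq_ediv_of_pos (by norm_num)]
    exact Int.ediv_nonneg hw (by norm_num)
  have hw8 : bpr * 8 = width := by
    have := PySem.Int.floordiv_mul_add_mod width 8
    rw [hmod] at this; omega
  have hab : y * bpr ≤ (y + 1) * bpr := by nlinarith
  set pix := (PySem.List.slice data_values (some (y * bpr)) (some ((y + 1) * bpr))).flatMap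
      (fun v => (PySem.List.pyRange 7 (-1) (-1)).map (fun bit => pvBitOf v bit)) with hpix
  have hslen : (PySem.List.slice data_values (some (y * bpr)) (some ((y + 1) * bpr))).length
      = ((y + 1) * bpr - y * bpr).toNat := by
    rw [PySem.List.slice_toNat data_values h0 (le_trans h0 hab)]
    simp only [List.length_take, List.length_drop]
    omega
  have hplen : (pix.length : Int) = width := by
    rw [hpix, pvPixels_len, hslen]
    push_cast
    have : ((y + 1) * bpr - y * bpr).toNat = bpr.toNat := by
      have : (y + 1) * bpr - y * bpr = bpr := by ring
      omega
    rw [this]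
    omega
  have h01 : ∀ p ∈ pix, p = 0 ∨ p = 1 := fun p hp => pvPixels_mem01 _ p hp
  rw [← hplen]
  rw [pvScan_eq pix h01 pix.length 0 [] le_rfl (by simp)]
  simp

-- ---- B-side machinery: bits of the packed row integer ----

-- the w-bit, MSB-first pixel list of a Nat
def pvBits (w n : Nat) : List Int :=
  (List.range w).reverse.map (fun b => if n.testBit b then (1 : Int) else 0)

-- the packed row value, at the Nat level
def pvN0 (row : List Int) : Nat :=
  row.foldl (fun m v => m * 256 + (PySem.Int.mod v 256).toNat) 0

-- Nat versions of Source B's edge masks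
def pvSN (n : Nat) : Nat := n ^^^ (n &&& (n >>> 1))
def pvEN (n : Nat) : Nat := n ^^^ (n &&& (n <<< 1))

-- Nat version of the pop loop
def pvPopN (width : Int) (s e : Nat) : List (Int × Int) :=
  if hs : 0 < s then
    (width - 1 - ((PySem.Int.bitLength (s : Int) - 1 : Nat) : Int),
     width - 1 - ((PySem.Int.bitLength (e : Int) - 1 : Nat) : Int)) ::
      pvPopN width (s ^^^ 2 ^ (PySem.Int.bitLength (s : Int) - 1))
        (e ^^^ 2 ^ (PySem.Int.bitLength (e : Int) - 1))
  else []
termination_by s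
decreasing_by exact pvPopNat_dec s hs

theorem pvCastXorPow (m k : Nat) :
    PySem.Int.bxor (m : Int) (1 <<< k) = ((m ^^^ 2 ^ k : Nat) : Int) := by
  rw [PySem.Int.bxor_natCast, Nat.shiftLeft_eq, one_mul]

theorem pvPop_eq_popN (width : Int) : ∀ (s : Nat), ∀ (e : Nat),
    pvPop width (s : Int) (e : Int) = pvPopN width s e := by
  intro s
  induction s using Nat.strong_induction_on with
  | _ s ih =>
    intro e
    by_cases h : 0 < s
    · have hlhs : pvPop width (s : Int) (e : Int)
          = (width - 1 - ((PySem.Int.bitLength ((s : Nat) : Int) - 1 : Nat) : Int),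
             width - 1 - ((PySem.Int.bitLength ((e : Nat) : Int) - 1 : Nat) : Int)) ::
            pvPop width
              (PySem.Int.bxor (s : Int) (1 <<< (PySem.Int.bitLength ((s : Nat) : Int) - 1)))
              (PySem.Int.bxor (e : Int) (1 <<< (PySem.Int.bitLength ((e : Nat) : Int) - 1))) := by
        rw [pvPop, dif_pos (by exact_mod_cast h : (0 : Int) < (s : Nat))]
      rw [hlhs, pvCastXorPow, pvCastXorPow, ih _ (pvPopNat_dec s h)]
      conv_rhs => rw [pvPopN]
      rw [dif_pos h]
    · rw [pvPop, pvPopN, dif_neg (by exact_mod_cast h), dif_neg h]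

-- ---- testBit toolbox ----

theorem pvHighBit {n w : Nat} (hn : n < 2 ^ w) {b : Nat} (hb : w ≤ b) : n.testBit b = false :=
  Nat.testBit_lt_two_pow (lt_of_lt_of_le hn (Nat.pow_le_pow_right (by norm_num) hb))

theorem pvGeOfTestBit {m k : Nat} (h : m.testBit k = true) : 2 ^ k ≤ m := by
  by_contra hc
  rw [Nat.testBit_lt_two_pow (by omega)] at h
  exact absurd h (by simp)

theorem pvBitLen_eq (m k : Nat) (h1 : 2 ^ k ≤ m) (h2 : m < 2 ^ (k + 1)) :
    PySem.Int.bitLength (m : Int) = k + 1 := by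
  have hm0 : (m : Int) ≠ 0 := by
    have : 0 < m := lt_of_lt_of_le (Nat.two_pow_pos k) h1
    exact_mod_cast this.ne'
  have hlt := PySem.Int.lt_two_pow_bitLength (m : Int)
  have hge := PySem.Int.two_pow_bitLength_le (m : Int) hm0
  rw [Int.natAbs_natCast] at hlt hge
  set B := PySem.Int.bitLength (m : Int) with hB
  rcases lt_trichotomy B (k + 1) with hc | hc | hc
  · exfalso
    have : (2 : Nat) ^ B ≤ 2 ^ k := Nat.pow_le_pow_right (by norm_num) (by omega)
    omega
  · exact hc
  · exfalso
    have : (2 : Nat) ^ (k + 1) ≤ 2 ^ (B - 1) := Nat.pow_le_pow_right (by norm_num) (by omega)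
    omega

theorem pvTestBit_split (a i b j : Nat) (hb : b < 2 ^ i) :
    (a * 2 ^ i + b).testBit j = if j < i then b.testBit j else a.testBit (j - i) := by
  by_cases h : j < i
  · rw [if_pos h, Nat.testBit_eq_decide_div_mod_eq, Nat.testBit_eq_decide_div_mod_eq]
    have hi : 2 ^ i = 2 ^ (i - j) * 2 ^ j := by rw [← pow_add]; congr 1; omega
    have hdiv : (a * 2 ^ i + b) / 2 ^ j = a * 2 ^ (i - j) + b / 2 ^ j := by
      rw [hi, ← mul_assoc, Nat.add_comm, Nat.add_mul_div_right _ _ (Nat.two_pow_pos j),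
        Nat.add_comm]
    rw [hdiv]
    have he : 2 ^ (i - j) = 2 * 2 ^ (i - j - 1) := by
      rw [← pow_succ']; congr 1; omega
    rw [he]
    have : a * (2 * 2 ^ (i - j - 1)) + b / 2 ^ j
        = b / 2 ^ j + (a * 2 ^ (i - j - 1)) * 2 := by ring
    rw [this, Nat.add_mul_mod_self_right]
  · rw [if_neg h, Nat.testBit_eq_decide_div_mod_eq, Nat.testBit_eq_decide_div_mod_eq]
    have hj : 2 ^ j = 2 ^ i * 2 ^ (j - i) := by rw [← pow_add]; congr 1; omega
    have hdiv : (a * 2 ^ i + b) / 2 ^ i = a + b / 2 ^ i := by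
      rw [Nat.add_comm, Nat.add_mul_div_right _ _ (Nat.two_pow_pos i), Nat.add_comm]
    have hb0 : b / 2 ^ i = 0 := Nat.div_eq_of_lt hb
    rw [hj, ← Nat.div_div_eq_div_mul, hdiv, hb0]
    norm_num

theorem pvBits_length (w n : Nat) : (pvBits w n).length = w := by simp [pvBits]

theorem pvBits_getElem (w n k : Nat) (hk : k < w) :
    (pvBits w n)[k]'(by rw [pvBits_length]; exact hk)
      = if n.testBit (w - 1 - k) then (1 : Int) else 0 := by
  unfold pvBits
  rw [List.getElem_map, List.getElem_reverse, List.getElem_range]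
  congr 2
  simp

theorem pvBits_append (w1 w2 a b : Nat) (hb : b < 2 ^ w2) :
    pvBits (w1 + w2) (a * 2 ^ w2 + b) = pvBits w1 a ++ pvBits w2 b := by
  apply List.ext_getElem
  · simp [pvBits_length]
  · intro k h1 h2
    rw [pvBits_length] at h1
    rw [pvBits_getElem _ _ _ h1]
    by_cases hk : k < w1
    · rw [List.getElem_append_left (by rw [pvBits_length]; exact hk)]
      rw [pvBits_getElem _ _ _ hk]
      rw [pvTestBit_split a w2 b (w1 + w2 - 1 - k) hb]
      rw [if_neg (show ¬ (w1 + w2 - 1 - k < w2) by omega)]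
      rw [show w1 + w2 - 1 - k - w2 = w1 - 1 - k by omega]
    · rw [List.getElem_append_right (by rw [pvBits_length]; omega)]
      simp only [pvBits_length]
      rw [pvBits_getElem w2 b (k - w1) (by omega)]
      rw [pvTestBit_split a w2 b (w1 + w2 - 1 - k) hb]
      rw [if_pos (show w1 + w2 - 1 - k < w2 by omega)]
      rw [show w1 + w2 - 1 - k = w2 - 1 - (k - w1) by omega]

theorem pvBits_zeroN (w : Nat) : pvBits w 0 = List.replicate w 0 := by
  rw [List.eq_replicate_iff]
  constructor
  · exact pvBits_length w 0
  · intro x hx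
    simp only [pvBits, List.mem_map] at hx
    obtain ⟨b, -, rfl⟩ := hx
    simp [Nat.zero_testBit]

theorem pvBits_ones (w : Nat) : pvBits w (2 ^ w - 1) = List.replicate w 1 := by
  rw [List.eq_replicate_iff]
  constructor
  · exact pvBits_length w _
  · intro x hx
    simp only [pvBits, List.mem_map, List.mem_reverse, List.mem_range] at hx
    obtain ⟨b, hb, rfl⟩ := hx
    simp [Nat.testBit_two_pow_sub_one, hb]

-- ---- the byte unpack agrees with the bits of v % 256 ----

theorem pvByteBit (v : Int) (b : Nat) (hb : b < 8) :
    pvBitOf v ((b : Nat) : Int) = if ((PySem.Int.mod v 256).toNat).testBit b then 1 else 0 := by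
  unfold pvBitOf
  rw [PySem.Int.band_one, Int.toNat_natCast,
    PySem.Int.mod_eq_emod_of_pos (a := v >>> b) (by norm_num : (0:Int) < 2),
    PySem.Int.mod_eq_emod_of_pos (a := v) (by norm_num : (0:Int) < 256),
    Int.shiftRight_eq_div_pow, Nat.testBit_eq_decide_div_mod_eq]
  interval_cases b <;> norm_num <;> split_ifs <;> omega

theorem pvByteRow (v : Int) :
    (PySem.List.pyRange 7 (-1) (-1)).map (fun bit => pvBitOf v bit)
      = pvBits 8 ((PySem.Int.mod v 256).toNat) := by
  have h : PySem.List.pyRange 7 (-1) (-1) = [7, 6, 5, 4, 3, 2, 1, 0] := by decide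
  have h2 : (List.range 8).reverse = [7, 6, 5, 4, 3, 2, 1, 0] := by decide
  rw [h]
  unfold pvBits
  rw [h2]
  simp only [List.map_cons, List.map_nil]
  rw [show (7 : Int) = ((7 : Nat) : Int) by norm_num, pvByteBit v 7 (by norm_num),
    show (6 : Int) = ((6 : Nat) : Int) by norm_num, pvByteBit v 6 (by norm_num),
    show (5 : Int) = ((5 : Nat) : Int) by norm_num, pvByteBit v 5 (by norm_num),
    show (4 : Int) = ((4 : Nat) : Int) by norm_num, pvByteBit v 4 (by norm_num),
    show (3 : Int) = ((3 : Nat) : Int) by norm_num, pvByteBit v 3 (by norm_num),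
    show (2 : Int) = ((2 : Nat) : Int) by norm_num, pvByteBit v 2 (by norm_num),
    show (1 : Int) = ((1 : Nat) : Int) by norm_num, pvByteBit v 1 (by norm_num),
    show (0 : Int) = ((0 : Nat) : Int) by norm_num, pvByteBit v 0 (by norm_num)]
  norm_num

-- ---- the packed integer and its bit list ----

theorem pvN0_acc (row : List Int) : ∀ a : Nat,
    row.foldl (fun m v => m * 256 + (PySem.Int.mod v 256).toNat) a
      = a * 2 ^ (8 * row.length) + pvN0 row := by
  induction row with
  | nil => intro a; simp [pvN0]
  | cons v t ih =>
    intro a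
    have hN : pvN0 (v :: t)
        = (PySem.Int.mod v 256).toNat * 2 ^ (8 * t.length) + pvN0 t := by
      unfold pvN0
      rw [List.foldl_cons, ih ((0 : Nat) * 256 + (PySem.Int.mod v 256).toNat)]
      ring_nf
      try rfl
    rw [List.foldl_cons, ih (a * 256 + (PySem.Int.mod v 256).toNat), hN]
    have hp : 2 ^ (8 * (v :: t).length) = 2 ^ (8 * t.length) * 256 := by
      rw [List.length_cons, show 8 * (t.length + 1) = 8 * t.length + 8 by ring, pow_add]
      norm_num
    rw [hp]
    ring

theorem pvN0_cons (v : Int) (t : List Int) :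
    pvN0 (v :: t) = (PySem.Int.mod v 256).toNat * 2 ^ (8 * t.length) + pvN0 t := by
  unfold pvN0
  rw [List.foldl_cons]
  have := pvN0_acc t ((0 : Nat) * 256 + (PySem.Int.mod v 256).toNat)
  rw [this]
  ring_nf
  try rfl

theorem pvModByteLt (v : Int) : (PySem.Int.mod v 256).toNat < 256 := by
  have h1 := PySem.Int.mod_nonneg v (b := 256) (by norm_num)
  have h2 := PySem.Int.mod_lt v (b := 256) (by norm_num)
  omega

theorem pvN0_lt (row : List Int) : pvN0 row < 2 ^ (8 * row.length) := by
  induction row with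
  | nil => simp [pvN0]
  | cons v t ih =>
    rw [pvN0_cons]
    have hv := pvModByteLt v
    have hp : 2 ^ (8 * (v :: t).length) = 256 * 2 ^ (8 * t.length) := by
      rw [List.length_cons, show 8 * (t.length + 1) = 8 + 8 * t.length by ring, pow_add]
      norm_num
    rw [hp]
    calc (PySem.Int.mod v 256).toNat * 2 ^ (8 * t.length) + pvN0 t
        < (PySem.Int.mod v 256).toNat * 2 ^ (8 * t.length) + 2 ^ (8 * t.length) := by omega
      _ = ((PySem.Int.mod v 256).toNat + 1) * 2 ^ (8 * t.length) := by ring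
      _ ≤ 256 * 2 ^ (8 * t.length) := by
          apply Nat.mul_le_mul_right
          omega

theorem pvPixels_bits (row : List Int) :
    row.flatMap (fun v => (PySem.List.pyRange 7 (-1) (-1)).map (fun bit => pvBitOf v bit))
      = pvBits (8 * row.length) (pvN0 row) := by
  induction row with
  | nil => simp [pvBits, pvN0]
  | cons v t ih =>
    rw [List.flatMap_cons, ih, pvByteRow, pvN0_cons]
    have hsplit := pvBits_append 8 (8 * t.length) (PySem.Int.mod v 256).toNat (pvN0 t) (pvN0_lt t)
    rw [show 8 * (v :: t).length = 8 + 8 * t.length by simp [List.length_cons]; ring, hsplit]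

-- ---- the Int fold and masks are the Nat versions ----

theorem pvFoldRange_getD {β : Type} (xs : List Int) (f : β → Int → β) :
    ∀ (k : Nat) (a b : Int) (init : β), 0 ≤ a → a + k = b → b ≤ (xs.length : Int) →
    (PySem.List.pyRange a b 1).foldl (fun acc i => f acc (PySem.List.pyGetD xs i 0)) init
      = (PySem.List.slice xs (some a) (some b)).foldl f init := by
  intro k
  induction k with
  | zero =>
    intro a b init h0 hab hb
    rw [show b = a by omega, PySem.List.pyRange_one_eq_nil le_rfl,
      PySem.List.slice_toNat xs h0 h0]
    simp
  | succ k ihk =>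
    intro a b init h0 hab hb
    rw [PySem.List.pyRange_one_cons (by omega), List.foldl_cons,
      PySem.List.slice_toNat xs h0 (by omega)]
    have halen : a.toNat < xs.length := by omega
    rw [List.drop_eq_getElem_cons halen,
      show (b.toNat - a.toNat) = (b.toNat - (a.toNat + 1)) + 1 by omega,
      List.take_succ_cons, List.foldl_cons,
      PySem.List.pyGetD_eq_getElem xs 0 h0 (by omega)]
    have hrec := ihk (a + 1) b (f init xs[a.toNat]) (by omega) (by omega) hb
    rw [PySem.List.slice_toNat xs (by omega) (by omega),
      show (a + 1).toNat = a.toNat + 1 by omega] at hrec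
    exact hrec

theorem pvFold_cast (row : List Int) : ∀ a : Nat,
    row.foldl (fun n v => n * 256 + PySem.Int.mod v 256) ((a : Nat) : Int)
      = ((row.foldl (fun m v => m * 256 + (PySem.Int.mod v 256).toNat) a : Nat) : Int) := by
  induction row with
  | nil => intro a; simp
  | cons v t ih =>
    intro a
    rw [List.foldl_cons, List.foldl_cons]
    have hm : PySem.Int.mod v 256 = (((PySem.Int.mod v 256).toNat : Nat) : Int) := by
      have := PySem.Int.mod_nonneg v (b := 256) (by norm_num)
      omega
    rw [hm, show ((a : Nat) : Int) * 256 + (((PySem.Int.mod v 256).toNat : Nat) : Int)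
        = (((a * 256 + (PySem.Int.mod v 256).toNat : Nat) : Nat) : Int) by push_cast; ring]
    exact ih _

theorem pvMaskS_cast (N : Nat) :
    PySem.Int.bxor (N : Int) (PySem.Int.band (N : Int) ((N : Int) >>> (1 : Nat)))
      = ((pvSN N : Nat) : Int) := by
  rw [← Int.natCast_shiftRight, PySem.Int.band_natCast, PySem.Int.bxor_natCast]
  rfl

theorem pvMaskE_cast (N : Nat) :
    PySem.Int.bxor (N : Int) (PySem.Int.band (N : Int) ((N : Int) <<< (1 : Nat)))
      = ((pvEN N : Nat) : Int) := by
  rw [← Int.natCast_shiftLeft, PySem.Int.band_natCast, PySem.Int.bxor_natCast]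
  rfl

-- ---- testBit characterisation of the masks ----

theorem pvTestBit_SN (n b : Nat) :
    (pvSN n).testBit b = (n.testBit b && !n.testBit (b + 1)) := by
  unfold pvSN
  rw [Nat.testBit_xor, Nat.testBit_and, Nat.testBit_shiftRight]
  rw [Nat.add_comm 1 b]
  cases h1 : n.testBit b <;> cases h2 : n.testBit (b + 1) <;> simp [h1, h2]

theorem pvTestBit_EN (n b : Nat) :
    (pvEN n).testBit b = (n.testBit b && !(decide (1 ≤ b) && n.testBit (b - 1))) := by
  unfold pvEN
  rw [Nat.testBit_xor, Nat.testBit_and, Nat.testBit_shiftLeft]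
  cases h1 : n.testBit b <;> cases h2 : decide (1 ≤ b) && n.testBit (b - 1) <;> simp [h1, h2]

theorem pvExistsBit {x : Nat} (hx : x ≠ 0) : ∃ i, x.testBit i = true := by
  by_contra hno
  push_neg at hno
  exact hx (Nat.eq_of_testBit_eq (fun i => by
    simp [Nat.zero_testBit]
    exact Bool.eq_false_iff.2 (fun h => (hno i) (by simpa using h))))

theorem pvPos_of_testBit {x i : Nat} (h : x.testBit i = true) : 0 < x := by
  rcases Nat.eq_zero_or_pos x with rfl | hp
  · rw [Nat.zero_testBit] at h; exact absurd h (by simp)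
  · exact hp

theorem pvEN_pos (n : Nat) (hn : 0 < n) : 0 < pvEN n := by
  induction n using Nat.strong_induction_on with
  | _ n ih =>
    by_cases hodd : n % 2 = 1
    · have h0 : n.testBit 0 = true := by simp [Nat.testBit_zero, hodd]
      apply pvPos_of_testBit (i := 0)
      rw [pvTestBit_EN]
      simp [h0]
    · have heven : n % 2 = 0 := by omega
      have hm : 0 < n / 2 := by omega
      have hrec := ih (n / 2) (by omega) hm
      obtain ⟨i, hi⟩ := pvExistsBit (Nat.pos_iff_ne_zero.1 hrec)
      apply pvPos_of_testBit (i := i + 1)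
      rw [pvTestBit_EN] at hi ⊢
      cases i with
      | zero =>
        have h1 : n.testBit 1 = (n / 2).testBit 0 := Nat.testBit_add_one n 0
        have h0 : n.testBit 0 = false := by simp [Nat.testBit_zero, heven]
        simp only [h1, h0]
        simpa using hi
      | succ j =>
        have ha : n.testBit (j + 2) = (n / 2).testBit (j + 1) := Nat.testBit_add_one n (j + 1)
        have hb : n.testBit (j + 1) = (n / 2).testBit j := Nat.testBit_add_one n j
        simp only [show j + 1 + 1 = j + 2 by omega, ha, show j + 2 - 1 = j + 1 by omega, hb]
        simpa using hi

-- ---- the grand lemma: the pop loop produces the run groups of the bit list ----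

theorem pvGR_zero_cons (l : List Int) (i : Int) :
    pvGroupRuns (0 :: l) i = pvGroupRuns l (i + 1) := by
  rw [pvGroupRuns]
  rw [if_neg (by norm_num : ¬((0 : Int) ≠ 0))]
  rw [← pvGroupRuns_zeros l (i + 1)]
  congr 1
  push_cast
  ring

theorem pvGR_zeros_rep (a : Nat) (l : List Int) (i : Int) :
    pvGroupRuns (List.replicate a 0 ++ l) i = pvGroupRuns l (i + a) := by
  induction a generalizing i with
  | zero => simp
  | succ a iha =>
    rw [List.replicate_succ, List.cons_append, pvGR_zero_cons, iha]
    congr 1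
    push_cast
    ring

theorem pvGR_ones_rep (k : Nat) (hk : 0 < k) (rest : List Int)
    (hrest : rest.takeWhile (· == (1 : Int)) = []) (i : Int) :
    pvGroupRuns (List.replicate k 1 ++ rest) i
      = (i, i + k - 1) :: pvGroupRuns rest (i + k) := by
  obtain ⟨m, rfl⟩ : ∃ m, k = m + 1 := ⟨k - 1, by omega⟩
  have hdrop : rest.dropWhile (· == (1 : Int)) = rest := by
    cases rest with
    | nil => rfl
    | cons x t =>
      rw [List.takeWhile_cons] at hrest
      rw [List.dropWhile_cons]
      by_cases hx : (x == (1 : Int)) = true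
      · rw [hx] at hrest; simp at hrest
      · simp at hx; simp [hx]
  have htake : ∀ (m : Nat), (List.replicate m (1 : Int) ++ rest).takeWhile (· == (1 : Int))
      = List.replicate m 1 := by
    intro m
    induction m with
    | zero => simpa using hrest
    | succ j ihj =>
      rw [List.replicate_succ, List.cons_append, List.takeWhile_cons]
      simp only [beq_self_eq_true, if_true]
      rw [ihj]
  have hdropall : ∀ (m : Nat), (List.replicate m (1 : Int) ++ rest).dropWhile (· == (1 : Int))
      = rest := by
    intro m
    induction m with
    | zero => simpa using hdrop
    | succ j ihj =>
      rw [List.replicate_succ, List.cons_append, List.dropWhile_cons]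
      simp only [beq_self_eq_true, if_true]
      exact ihj
  rw [List.replicate_succ, List.cons_append, pvGroupRuns]
  rw [if_pos (by norm_num : ((1 : Int) ≠ 0))]
  rw [htake m, hdropall m]
  simp only [List.length_replicate]
  have hc : (1 : Int) + (m : Int) = ((m + 1 : Nat) : Int) := by push_cast; ring
  rw [hc]

theorem pvPopN_gRuns (W : Int) : ∀ (n : Nat), ∀ (w : Nat), n < 2 ^ w →
    pvPopN W (pvSN n) (pvEN n) = pvGroupRuns (pvBits w n) (W - w) := by
  intro n
  induction n using Nat.strong_induction_on with
  | _ n ih =>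
    intro w hw
    by_cases hn : n = 0
    · subst hn
      have hs0 : pvSN 0 = 0 := by decide
      rw [hs0, pvPopN, dif_neg (by omega)]
      rw [pvBits_zeroN, show List.replicate w (0 : Int) = List.replicate w 0 ++ [] by simp,
        pvGR_zeros_rep]
      simp [pvGroupRuns]
    · have hnpos : 0 < n := Nat.pos_of_ne_zero hn
      -- bit length of n
      have hn0 : (n : Int) ≠ 0 := by exact_mod_cast hn
      have hlt := PySem.Int.lt_two_pow_bitLength (n : Int)
      have hge := PySem.Int.two_pow_bitLength_le (n : Int) hn0
      rw [Int.natAbs_natCast] at hlt hge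
      set B := PySem.Int.bitLength (n : Int) with hBdef
      have hB1 : 1 ≤ B := by
        by_contra h
        have h0 : B = 0 := by omega
        rw [h0, pow_zero] at hlt
        omega
      have hB2 : n < 2 ^ ((B - 1) + 1) := by rwa [show (B - 1) + 1 = B by omega]
      have hBw : B ≤ w := by
        by_contra h
        have : (2 : Nat) ^ w ≤ 2 ^ (B - 1) := Nat.pow_le_pow_right (by norm_num) (by omega)
        omega
      have hntop : n.testBit (B - 1) = true := pvTopBit n (B - 1) hge hB2
      -- the end mask
      have hEpos := pvEN_pos n hnpos
      have hEn0 : ((pvEN n : Nat) : Int) ≠ 0 := by exact_mod_cast hEpos.ne'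
      have hElt' := PySem.Int.lt_two_pow_bitLength ((pvEN n : Nat) : Int)
      have hEge' := PySem.Int.two_pow_bitLength_le ((pvEN n : Nat) : Int) hEn0
      rw [Int.natAbs_natCast] at hElt' hEge'
      set BE := PySem.Int.bitLength ((pvEN n : Nat) : Int) with hBEdef
      have hBE1 : 1 ≤ BE := by
        by_contra h
        have h0 : BE = 0 := by omega
        rw [h0, pow_zero] at hElt'
        omega
      set E1 := BE - 1 with hE1def
      have hE2 : pvEN n < 2 ^ (E1 + 1) := by rwa [show E1 + 1 = BE by omega]
      have hEtop : (pvEN n).testBit E1 = true := pvTopBit (pvEN n) E1 hEge' hE2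
      have hand := hEtop
      rw [pvTestBit_EN, Bool.and_eq_true] at hand
      have hnE1 : n.testBit E1 = true := hand.1
      have hprev : 1 ≤ E1 → n.testBit (E1 - 1) = false := by
        intro h1
        have h2 := hand.2
        simpa [h1] using h2
      -- nothing above bit B-1 in n, hence also nothing in the masks
      have hnbits_high : ∀ b, B ≤ b → n.testBit b = false := fun b hb =>
        pvHighBit (by rwa [show (B - 1) + 1 = B by omega] at hB2) hb
      have hElt2 : pvEN n < 2 ^ B := by
        apply Nat.lt_pow_two_of_testBit
        intro i hi
        rw [pvTestBit_EN, hnbits_high i hi]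
        simp
      have hE1B : E1 < B := by
        by_contra h
        have h2 : (2 : Nat) ^ B ≤ 2 ^ E1 := Nat.pow_le_pow_right (by norm_num) (by omega)
        have h3 := pvGeOfTestBit hEtop
        omega
      -- the chain of ones from E1 to B-1
      have hEbits_high : ∀ b, E1 + 1 ≤ b → (pvEN n).testBit b = false := fun b hb =>
        pvHighBit hE2 hb
      have hchain : ∀ b, E1 ≤ b → b < B → n.testBit b = true := by
        have main : ∀ k, k ≤ B - 1 - E1 → n.testBit (B - 1 - k) = true := by
          intro k
          induction k with
          | zero => intro _; simpa using hntop
          | succ k ihk =>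
            intro hk
            have hb := ihk (by omega)
            have hgt : E1 + 1 ≤ B - 1 - k := by omega
            have he := hEbits_high (B - 1 - k) hgt
            rw [pvTestBit_EN, hb] at he
            have h1le : (decide (1 ≤ B - 1 - k) : Bool) = true := by simp; omega
            rw [h1le] at he
            simp only [Bool.true_and, Bool.not_eq_eq_eq_not, Bool.not_false] at he
            have hx : n.testBit (B - 1 - k - 1) = true := by
              by_contra hc
              simp only [Bool.not_eq_true] at hc
              rw [hc] at he
              simp at he
            rwa [show B - 1 - k - 1 = B - 1 - (k + 1) by omega] at hx
        intro b h1 h2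
        have hmain := main (B - 1 - b) (by omega)
        rwa [show B - 1 - (B - 1 - b) = b by omega] at hmain
      -- the remainder below the first run
      set n' := n % 2 ^ E1 with hn'def
      have hn'lt : n' < 2 ^ E1 := Nat.mod_lt _ (Nat.two_pow_pos E1)
      have hn'bits : ∀ b, n'.testBit b = (decide (b < E1) && n.testBit b) := fun b =>
        Nat.testBit_mod_two_pow n E1 b
      have hn'ltn : n' < n := by
        have h1 : (2 : Nat) ^ E1 ≤ 2 ^ (B - 1) := Nat.pow_le_pow_right (by norm_num) (by omega)
        omega
      -- the start mask: top bit B-1, nothing above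
      have hStop : (pvSN n).testBit (B - 1) = true := by
        rw [pvTestBit_SN, hntop, show (B - 1) + 1 = B by omega, hnbits_high B le_rfl]
        rfl
      have hSpos : 0 < pvSN n := pvPos_of_testBit hStop
      have hSlt : pvSN n < 2 ^ B := by
        apply Nat.lt_pow_two_of_testBit
        intro i hi
        rw [pvTestBit_SN, hnbits_high i hi]
        simp
      have hblS : PySem.Int.bitLength ((pvSN n : Nat) : Int) = B := by
        have := pvBitLen_eq (pvSN n) (B - 1) (pvGeOfTestBit hStop)
          (by rwa [show (B - 1) + 1 = B by omega])
        omega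
      -- popping the top bit of each mask gives the masks of the remainder
      have hSrec : pvSN n ^^^ 2 ^ (B - 1) = pvSN n' := by
        apply Nat.eq_of_testBit_eq
        intro b
        rw [Nat.testBit_xor, pvTestBit_SN, pvTestBit_SN, Nat.testBit_two_pow, hn'bits b,
          hn'bits (b + 1)]
        rcases Nat.lt_or_ge b E1 with hb | hb
        · rcases Nat.lt_or_ge (b + 1) E1 with hb1 | hb1
          · have hd : (decide (B - 1 = b) : Bool) = false := by simp; omega
            simp [hd, hb, hb1]
          · -- b + 1 = E1, so bit b of n is the zero below the run
            have hfb : n.testBit b = false := by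
              have h2 := hprev (by omega)
              rwa [show E1 - 1 = b by omega] at h2
            have hd : (decide (B - 1 = b) : Bool) = false := by simp; omega
            simp [hd, hfb, hb]
        · have hd5 : (decide (b < E1) : Bool) = false := by simp; omega
          rcases Nat.lt_or_ge b B with hbB | hbB
          · by_cases hBb : b = B - 1
            · have h1 : n.testBit b = true := by rw [hBb]; exact hntop
              have h2 : n.testBit (b + 1) = false := hnbits_high _ (by omega)
              have hd : (decide (B - 1 = b) : Bool) = true := by simp [hBb]
              simp [h1, h2, hd, hd5]
            · have h1 : n.testBit b = true := hchain b hb hbB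
              have h2 : n.testBit (b + 1) = true := hchain (b + 1) (by omega) (by omega)
              have hd : (decide (B - 1 = b) : Bool) = false := by simp; omega
              simp [h1, h2, hd, hd5]
          · have h1 : n.testBit b = false := hnbits_high b hbB
            have hd : (decide (B - 1 = b) : Bool) = false := by simp; omega
            simp [h1, hd, hd5]
      have hErec : pvEN n ^^^ 2 ^ E1 = pvEN n' := by
        apply Nat.eq_of_testBit_eq
        intro b
        rw [Nat.testBit_xor, pvTestBit_EN, pvTestBit_EN, Nat.testBit_two_pow, hn'bits b]
        rcases Nat.lt_or_ge b E1 with hb | hb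
        · have hd : (decide (E1 = b) : Bool) = false := by simp; omega
          by_cases h1b : 1 ≤ b
          · rw [hn'bits (b - 1)]
            have hd1 : (decide (b - 1 < E1) : Bool) = true := by simp; omega
            simp [hd, hb, hd1]
          · have hb0 : b = 0 := by omega
            subst hb0
            simp [hd, show (0 : Nat) < E1 by omega]
        · have hd5 : (decide (b < E1) : Bool) = false := by simp; omega
          rcases Nat.eq_or_lt_of_le hb with hbeq | hbgt
          · -- b = E1
            subst hbeq
            by_cases h1b : 1 ≤ E1
            · have h2 : n.testBit (E1 - 1) = false := hprev h1b
              simp [hd5, hnE1, h1b, h2]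
            · have h0 : ¬ (1 ≤ E1) := h1b
              simp [hd5, hnE1, h0]
          · have hd : (decide (E1 = b) : Bool) = false := by simp; omega
            rcases Nat.lt_or_ge b B with hbB | hbB
            · have h2 : n.testBit b = true := hchain b (by omega) hbB
              have h3 : n.testBit (b - 1) = true := hchain (b - 1) (by omega) (by omega)
              simp [hd, hd5, h2, h3, show 1 ≤ b by omega]
            · have h2 : n.testBit b = false := hnbits_high b hbB
              simp [hd, hd5, h2]
      -- the bit list decomposes into zeros, the run of ones, and the rest
      have hdec : pvBits w n
          = List.replicate (w - B) 0 ++ (List.replicate (B - E1) 1 ++ pvBits E1 n') := by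
        have e0 : pvBits w n = pvBits (w - B) 0 ++ pvBits B n := by
          have h := pvBits_append (w - B) B 0 n (by rwa [show (B - 1) + 1 = B by omega] at hB2)
          rw [show (w - B) + B = w by omega] at h
          simpa using h
        have eM : n = (2 ^ (B - E1) - 1) * 2 ^ E1 + n' := by
          apply Nat.eq_of_testBit_eq
          intro b
          rw [pvTestBit_split _ _ _ _ hn'lt]
          by_cases hb : b < E1
          · rw [if_pos hb, hn'bits b]
            simp [hb]
          · rw [if_neg hb, Nat.testBit_two_pow_sub_one]
            by_cases hbB : b < B
            · rw [hchain b (by omega) hbB]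
              simp
              omega
            · rw [hnbits_high b (by omega)]
              simp
              omega
        have e1 : pvBits B n = pvBits (B - E1) (2 ^ (B - E1) - 1) ++ pvBits E1 n' := by
          conv_lhs => rw [eM]
          have h := pvBits_append (B - E1) E1 (2 ^ (B - E1) - 1) n' hn'lt
          rwa [show (B - E1) + E1 = B by omega] at h
        rw [e0, e1, pvBits_zeroN, pvBits_ones]
      -- the head of the rest is a zero (or the rest is empty)
      have hresttake : (pvBits E1 n').takeWhile (· == (1 : Int)) = [] := by
        by_cases hE0 : E1 = 0
        · rw [hE0]; rfl
        · unfold pvBits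
          rw [show E1 = (E1 - 1) + 1 by omega, List.range_succ, List.reverse_append]
          simp only [List.reverse_cons, List.reverse_nil, List.nil_append, List.cons_append,
            List.map_cons, List.takeWhile_cons]
          have h0 : n'.testBit (E1 - 1) = false := by
            rw [hn'bits, hprev (by omega)]
            simp
          rw [h0]
          norm_num
      -- unfold one pop step
      rw [pvPopN, dif_pos hSpos, hblS, ← hBEdef, ← hE1def, hSrec]
      rw [hErec]
      rw [ih n' hn'ltn E1 hn'lt]
      -- unfold one group step on the right
      rw [hdec, pvGR_zeros_rep, pvGR_ones_rep (B - E1) (by omega) _ hresttake]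
      have hcW : ((w - B : Nat) : Int) = (w : Int) - (B : Int) := by
        push_cast [Nat.cast_sub hBw]; ring
      have hcB : ((B - 1 : Nat) : Int) = (B : Int) - 1 := by
        push_cast [Nat.cast_sub hB1]; ring
      have hcBE : ((B - E1 : Nat) : Int) = (B : Int) - (E1 : Int) := by
        push_cast [Nat.cast_sub (le_of_lt hE1B)]; ring
      rw [hcW, hcB, hcBE]
      congr 1
      · congr 1 <;> omega
      · congr 1
        omega

-- ===== VERDICT (by name: the statement is the Claim_ definition above) =====
theorem bytes_to_runs_spec : Claim_equal_bytes_to_runs := by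
  intro data_values width height _hdom hpre
  unfold Spec_bytes_to_runs
  simp only [bytes_to_runs, bytes_to_runs_alt]
  rcases hpre with hh | hneg | ⟨hw, hmod, hlen⟩
  · rw [PySem.List.pyRange_one_eq_nil hh]
    rfl
  · -- width < 0: A's scan never starts and B's packing range is empty, every row is []
    apply PySem.List.foldl_congr_mem
    intro acc y _
    congr 1
    congr 1
    have hbprneg : PySem.Int.floordiv width 8 < 0 := by
      rw [PySem.Int.floordiv_eq_ediv_of_pos (by norm_num)]
      omega
    have hrange : PySem.List.pyRange (y * PySem.Int.floordiv width 8)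
        ((y + 1) * PySem.Int.floordiv width 8) 1 = [] := by
      apply PySem.List.pyRange_one_eq_nil
      have he : (y + 1) * PySem.Int.floordiv width 8
          = y * PySem.Int.floordiv width 8 + PySem.Int.floordiv width 8 := by ring
      omega
    rw [hrange]
    simp only [List.foldl_nil]
    rw [pvScan, dif_neg (by omega : ¬ (0 : Int) < width)]
    rw [pvPop, dif_neg (by decide :
      ¬ (0 : Int) < PySem.Int.bxor 0 (PySem.Int.band 0 ((0 : Int) >>> (1 : Nat))))]
  · apply PySem.List.foldl_congr_mem
    intro acc y hy
    rw [PySem.List.mem_pyRange_one] at hy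
    congr 1
    congr 1
    set bpr := PySem.Int.floordiv width 8 with hbpr
    have hbpr0 : 0 ≤ bpr := by
      rw [hbpr, PySem.Int.floordiv_eq_ediv_of_pos (by norm_num)]
      exact Int.ediv_nonneg hw (by norm_num)
    have h0 : 0 ≤ y * bpr := mul_nonneg hy.1 hbpr0
    have hle : (y + 1) * bpr ≤ (data_values.length : Int) := by
      have h1 : (y + 1) * bpr ≤ height * bpr := by
        have h2 : y + 1 ≤ height := hy.2
        nlinarith
      have h2 : height * bpr = bpr * height := by ring
      omega
    have hw8 : bpr * 8 = width := by
      have := PySem.Int.floordiv_mul_add_mod width 8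
      rw [hmod] at this; omega
    -- B's indexed packing loop is the fold over the row slice
    have hk : y * bpr + ((bpr.toNat : Nat) : Int) = (y + 1) * bpr := by
      rw [Int.toNat_of_nonneg hbpr0]; ring
    rw [pvFoldRange_getD data_values (fun n v => n * 256 + PySem.Int.mod v 256)
      bpr.toNat (y * bpr) ((y + 1) * bpr) 0 h0 hk hle]
    set row := PySem.List.slice data_values (some (y * bpr)) (some ((y + 1) * bpr)) with hrow
    -- A side
    rw [pvPixels_eq]
    rw [pvRow_eq data_values width y hw hmod h0 hle]
    -- B side
    have hfold : row.foldl (fun n v => n * 256 + PySem.Int.mod v 256) 0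
        = ((pvN0 row : Nat) : Int) := by
      have := pvFold_cast row 0
      simpa [pvN0] using this
    rw [hfold, pvMaskS_cast, pvMaskE_cast, pvPop_eq_popN]
    -- row length
    have hslen : row.length = bpr.toNat := by
      rw [hrow, PySem.List.slice_toNat data_values h0 (le_trans h0 (by nlinarith))]
      simp only [List.length_take, List.length_drop]
      have he : ((y + 1) * bpr).toNat = (y * bpr).toNat + bpr.toNat := by
        have : (y + 1) * bpr = y * bpr + bpr := by ring
        omega
      omega
    have hwidth : ((8 * row.length : Nat) : Int) = width := by
      rw [hslen]
      push_cast
      omega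
    rw [pvPopN_gRuns width (pvN0 row) (8 * row.length) (pvN0_lt row), hwidth]
    rw [pvPixels_bits row]
    norm_num
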